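-- pv_equiv track=rewrite | github.com/claudiodriussi/andrep | renderer/andrep/renderer.py | _items_to_html
-- ===== SOURCE A (Python) =====
-- def _items_to_html(items: "list[tuple[str, int, int | None]]") -> str:
--     """Assemble a flat items list to HTML, managing flex containers for multi-column."""
--     parts: list[str] = []
--     in_flex_gap: "int | None" = None
--
--     for html, _h, tag in items:
--         if tag is not None:
--             if in_flex_gap != tag:
--                 if in_flex_gap is not None:
--                     parts.append("</div>\n")
--                 parts.append(
--                     f'<div style="display:flex;flex-wrap:wrap;'
--                     f'column-gap:{tag}px;align-items:flex-start">\n'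
--                 )
--                 in_flex_gap = tag
--         else:
--             if in_flex_gap is not None:
--                 parts.append("</div>\n")
--                 in_flex_gap = None
--         parts.append(html)
--
--     if in_flex_gap is not None:
--         parts.append("</div>\n")
--     return "".join(parts)
-- ===== SOURCE B (Python) =====
-- def _items_to_html(items: "list[tuple[str, int, int | None]]") -> str:
--     """Assemble items into HTML by grouping consecutive runs sharing a tag."""
--     parts: list[str] = []
--     i, n = 0, len(items)
--     while i < n:
--         tag = items[i][2]
--         j = i + 1
--         while j < n and items[j][2] == tag:
--             j += 1
--         htmls = [it[0] for it in items[i:j]]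
--         if tag is None:
--             parts.extend(htmls)
--         else:
--             parts.append(
--                 f'<div style="display:flex;flex-wrap:wrap;'
--                 f'column-gap:{tag}px;align-items:flex-start">\n'
--             )
--             parts.extend(htmls)
--             parts.append("</div>\n")
--         i = j
--     return "".join(parts)
-- ===== Notes on version B (the rewrite author's own statement) =====
-- stated objective: simpler
-- what changed: Replaces the running in_flex_gap state machine with explicit grouping of consecutive items by tag: each run is emitted at once (wrapped in the flex div when its tag is non-None), so there is no incremental open/close bookkeeping or trailing close.
import Mathlib
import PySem

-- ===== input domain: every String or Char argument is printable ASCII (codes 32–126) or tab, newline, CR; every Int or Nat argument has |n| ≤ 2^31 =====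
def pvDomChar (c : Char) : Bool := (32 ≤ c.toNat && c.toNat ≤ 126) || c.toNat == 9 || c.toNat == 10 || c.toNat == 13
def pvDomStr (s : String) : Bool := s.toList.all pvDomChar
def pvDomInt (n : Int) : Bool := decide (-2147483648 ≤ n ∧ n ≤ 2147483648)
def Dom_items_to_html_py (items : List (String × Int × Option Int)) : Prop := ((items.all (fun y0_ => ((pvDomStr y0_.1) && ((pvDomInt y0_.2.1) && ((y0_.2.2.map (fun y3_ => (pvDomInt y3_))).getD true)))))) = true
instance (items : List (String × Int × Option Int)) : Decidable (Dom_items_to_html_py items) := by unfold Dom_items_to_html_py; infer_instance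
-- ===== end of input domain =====

-- B replaces A's running in_flex_gap state machine by explicit grouping of consecutive
-- items sharing a tag (objective: simpler decomposition, same output byte for byte).

-- ===== PORT A =====
-- the f-string wrapper opener (shared literal formatting)
def pvOpenDiv (t : Int) : String :=
  "<div style=\"display:flex;flex-wrap:wrap;column-gap:" ++ PySem.Int.toStr t ++ "px;align-items:flex-start\">\n"

-- one iteration of A's for-loop over state (parts, in_flex_gap)
def itemsStepA (st : List String × Option Int) (it : String × Int × Option Int) :
    List String × Option Int :=
  match it.2.2 with
  | some t =>
    let st :=
      if st.2 ≠ some t then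
        ((if st.2.isSome then st.1 ++ ["</div>\n"] else st.1) ++ [pvOpenDiv t], some t)
      else st
    (st.1 ++ [it.1], st.2)
  | none =>
    ((if st.2.isSome then st.1 ++ ["</div>\n"] else st.1) ++ [it.1], none)

def items_to_html_py (items : List (String × Int × Option Int)) : String :=
  let st := items.foldl itemsStepA ([], none)
  PySem.Str.join "" (st.1 ++ (if st.2.isSome then ["</div>\n"] else []))

-- ===== PORT B =====
-- parts produced by one run of consecutive equal tags, then the rest
def altParts : List (String × Int × Option Int) → List String
  | [] => []
  | (html, _h, tag) :: rest =>
    let run := rest.takeWhile (fun it => it.2.2 == tag)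
    let rest' := rest.dropWhile (fun it => it.2.2 == tag)
    let htmls := html :: run.map (·.1)
    (match tag with
     | none => htmls
     | some t => pvOpenDiv t :: (htmls ++ ["</div>\n"])) ++ altParts rest'
termination_by l => l.length
decreasing_by
  simp only [List.length_cons]
  exact Nat.lt_succ_of_le (List.length_dropWhile_le _ _)

def items_to_html_py_alt (items : List (String × Int × Option Int)) : String :=
  PySem.Str.join "" (altParts items)

-- ===== PRECONDITION & SPEC =====
def Spec_items_to_html_py (items : List (String × Int × Option Int)) (out : String) : Prop := out = items_to_html_py_alt items
instance (items : List (String × Int × Option Int)) (out : String) : Decidable (Spec_items_to_html_py items out) := by unfold Spec_items_to_html_py; infer_instance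

-- ===== CLAIM (what is proved, stated in full; the proofs are below) =====
def Claim_equal_items_to_html_py : Prop := ∀ (items : List (String × Int × Option Int)), Dom_items_to_html_py items → Spec_items_to_html_py items (items_to_html_py items)

-- ===== LEMMAS AND PROOFS =====

-- A's loop over a run of None-tagged items just appends their htmls
theorem foldl_run_none (l : List (String × Int × Option Int)) (p : List String)
    (h : ∀ it ∈ l, it.2.2 = none) :
    l.foldl itemsStepA (p, none) = (p ++ l.map (·.1), none) := by
  induction l generalizing p with
  | nil => simp
  | cons a l ih =>
    have ha : a.2.2 = none := h a (List.mem_cons_self)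
    simp only [List.foldl_cons, itemsStepA, ha, Option.isSome_none, Bool.false_eq_true,
      if_false, List.map_cons]
    rw [ih _ (fun it hit => h it (List.mem_cons_of_mem _ hit))]
    simp

-- A's loop over a run tagged 'some t', entered with in_flex_gap = t, just appends htmls
theorem foldl_run_some (l : List (String × Int × Option Int)) (p : List String) (t : Int)
    (h : ∀ it ∈ l, it.2.2 = some t) :
    l.foldl itemsStepA (p, some t) = (p ++ l.map (·.1), some t) := by
  induction l generalizing p with
  | nil => simp
  | cons a l ih =>
    have ha : a.2.2 = some t := h a (List.mem_cons_self)
    simp only [List.foldl_cons, itemsStepA, ha, ne_eq, not_true_eq_false, if_false,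
      List.map_cons]
    rw [ih _ (fun it hit => h it (List.mem_cons_of_mem _ hit))]
    simp

-- when the next tag differs, running from (p, some t) equals closing first and running from none
theorem foldl_shift (a : String × Int × Option Int) (l : List (String × Int × Option Int))
    (p : List String) (t : Int) (ha : a.2.2 ≠ some t) :
    (a :: l).foldl itemsStepA (p, some t) = (a :: l).foldl itemsStepA (p ++ ["</div>\n"], none) := by
  simp only [List.foldl_cons]
  congr 1
  cases hc : a.2.2 with
  | none => simp [itemsStepA, hc]
  | some u =>
    have : u ≠ t := by intro h; exact ha (by rw [hc, h])
    simp [itemsStepA, hc, Option.some.injEq, Ne.symm this, List.append_assoc]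

theorem dropWhile_cons_head {α : Type} (p : α → Bool) (l : List α) (a : α) (l' : List α)
    (h : l.dropWhile p = a :: l') : p a = false := by
  induction l with
  | nil => simp at h
  | cons b l ih =>
    rw [List.dropWhile_cons] at h
    by_cases hb : p b
    · exact ih (by simpa [hb] using h)
    · simp [hb] at h
      simp [← h.1, hb]

def pvFinalize (st : List String × Option Int) : List String :=
  st.1 ++ (if st.2.isSome then ["</div>\n"] else [])

theorem main_parts (n : Nat) : ∀ (l : List (String × Int × Option Int)), l.length ≤ n →
    ∀ (p : List String), pvFinalize (l.foldl itemsStepA (p, none)) = p ++ altParts l := by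
  induction n with
  | zero =>
    intro l hl p
    have : l = [] := List.length_eq_zero_iff.mp (Nat.le_zero.mp hl)
    subst this; simp [pvFinalize, altParts]
  | succ m ih =>
    intro l hl p
    match l with
    | [] => simp [pvFinalize, altParts]
    | (html, hh, tag) :: rest =>
      have hrest : rest.length ≤ m := by
        simpa using Nat.lt_succ_iff.mp (Nat.lt_of_lt_of_le (by simp) hl)
      have hsplit : rest.takeWhile (fun it => it.2.2 == tag) ++
          rest.dropWhile (fun it => it.2.2 == tag) = rest := List.takeWhile_append_dropWhile
      have hrun : ∀ it ∈ rest.takeWhile (fun it => it.2.2 == tag), it.2.2 = tag := by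
        intro it hit
        simpa using List.mem_takeWhile_imp hit
      have hlen' : (rest.dropWhile (fun it => it.2.2 == tag)).length ≤ m :=
        Nat.le_trans (List.length_dropWhile_le _ _) hrest
      cases tag with
      | none =>
        -- first step appends html, state stays none
        simp only [List.foldl_cons, itemsStepA, Option.isSome_none, Bool.false_eq_true, if_false]
        conv_lhs => rw [← hsplit]
        rw [List.foldl_append, foldl_run_none _ _ (fun it hit => hrun it hit), ih _ hlen']
        conv_rhs => rw [altParts]
        simp [List.append_assoc]
      | some t =>
        simp only [List.foldl_cons, itemsStepA, ne_eq, Option.isSome_none]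
        have hne : (none : Option Int) ≠ some t := by simp
        simp only [hne, not_false_eq_true, if_true, Bool.false_eq_true, if_false]
        conv_lhs => rw [← hsplit]
        rw [List.foldl_append, foldl_run_some _ _ t (fun it hit => hrun it hit)]
        cases hdrop : rest.dropWhile (fun it => it.2.2 == some t) with
        | nil =>
          conv_rhs => rw [altParts]
          simp [pvFinalize, hdrop, altParts, List.append_assoc]
        | cons a l' =>
          have hafail : (fun it : String × Int × Option Int => it.2.2 == some t) a = false :=
            dropWhile_cons_head _ rest a l' hdrop
          have hane : a.2.2 ≠ some t := by simpa using hafail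
          have hlen2 : (a :: l').length ≤ m := hdrop ▸ hlen'
          rw [foldl_shift a l' _ t hane, ih _ hlen2]
          conv_rhs => rw [altParts]
          simp [hdrop, List.append_assoc]

-- ===== VERDICT (by name: the statement is the Claim_ definition above) =====
theorem items_to_html_py_spec : Claim_equal_items_to_html_py := by
  intro items _
  unfold Spec_items_to_html_py
  have := main_parts items.length items (Nat.le_refl _) []
  simp only [pvFinalize, List.nil_append] at this
  unfold items_to_html_py items_to_html_py_alt
  dsimp only
  rw [this]
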